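-- pv_equiv track=rewrite | github.com/AlenaMus/L-25-TheAgentsGame | agents/league_manager/src/league_manager/scheduler/referee_assigner.py | assign_referees_to_matches
-- ===== SOURCE A (Python) =====
-- from typing import List, Dict, Tuple
--
-- def assign_referees_to_matches(
--     schedule: List[List[Tuple[str, str]]],
--     referees: List[Dict]
-- ) -> List[List[Dict]]:
--     """
--     Assign referees to matches.
--
--     Simple round-robin assignment of referees to matches.
--
--     Args:
--         schedule: List of rounds (each round is list of match tuples)
--         referees: List of referee dictionaries
--
--     Returns:
--         List of rounds with referee assignments
--
--     Example:
--         >>> schedule = [[("P01", "P02"), ("P03", "P04")]]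
--         >>> referees = [{"referee_id": "REF01", "endpoint": "..."}]
--         >>> assigned = assign_referees_to_matches(schedule, referees)
--         >>> assigned[0][0]["referee_id"]
--         'REF01'
--     """
--     if not referees:
--         raise ValueError("No referees available")
--
--     referee_idx = 0
--     assigned_schedule = []
--
--     for round_matches in schedule:
--         round_data = []
--         for match in round_matches:
--             # Assign next available referee (round-robin)
--             referee = referees[referee_idx % len(referees)]
--             referee_idx += 1
--
--             round_data.append({
--                 "player_A_id": match[0],
--                 "player_B_id": match[1],
--                 "referee_id": referee["referee_id"],
--                 "referee_endpoint": referee["endpoint"]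
--             })
--
--         assigned_schedule.append(round_data)
--
--     return assigned_schedule
-- ===== SOURCE B (Python) =====
-- from typing import List, Dict, Tuple
-- from itertools import chain
--
--
-- def assign_referees_to_matches(
--     schedule: List[List[Tuple[str, str]]],
--     referees: List[Dict]
-- ) -> List[List[Dict]]:
--     """Flat assignment: pair every match of the flattened schedule with
--     referees[k % n] via a global enumerate index, then rebuild the round
--     structure by slicing the flat list at each round's length."""
--     if not referees:
--         raise ValueError("No referees available")
--
--     n = len(referees)
--     flat = [
--         {
--             "player_A_id": match[0],
--             "player_B_id": match[1],
--             "referee_id": referees[k % n]["referee_id"],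
--             "referee_endpoint": referees[k % n]["endpoint"],
--         }
--         for k, match in enumerate(chain.from_iterable(schedule))
--     ]
--
--     result = []
--     pos = 0
--     for round_matches in schedule:
--         result.append(flat[pos:pos + len(round_matches)])
--         pos += len(round_matches)
--     return result
-- ===== Notes on version B (the rewrite author's own statement) =====
-- stated objective: alternative
-- what changed: Replaces the nested loops with a mutable cross-round counter by a single flat pass (enumerate over the flattened schedule, referee = referees[k % n]) followed by re-slicing the flat list into the original round lengths.
import Mathlib
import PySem

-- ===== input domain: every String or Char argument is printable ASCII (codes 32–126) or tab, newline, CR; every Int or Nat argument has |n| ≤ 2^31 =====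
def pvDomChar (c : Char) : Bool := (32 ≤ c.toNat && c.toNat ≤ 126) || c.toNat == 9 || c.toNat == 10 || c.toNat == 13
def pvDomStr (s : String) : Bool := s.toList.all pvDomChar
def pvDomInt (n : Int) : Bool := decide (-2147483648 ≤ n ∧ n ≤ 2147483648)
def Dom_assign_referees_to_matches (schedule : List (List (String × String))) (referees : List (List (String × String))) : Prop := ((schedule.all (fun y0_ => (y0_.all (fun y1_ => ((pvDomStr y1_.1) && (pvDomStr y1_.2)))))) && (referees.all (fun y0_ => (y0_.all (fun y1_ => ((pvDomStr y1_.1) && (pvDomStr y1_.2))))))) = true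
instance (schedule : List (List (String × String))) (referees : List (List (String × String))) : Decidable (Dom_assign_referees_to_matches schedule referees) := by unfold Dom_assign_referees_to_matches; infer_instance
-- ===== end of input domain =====

-- B replaces A's nested loops with a cross-round counter by one flat enumerate pass over the
-- flattened schedule followed by re-slicing into the round lengths (objective: alternative).

-- Python dict lookup d[k] on an assoc list: first match; total form (Pre_ guarantees the key is
-- present wherever Python A evaluates the lookup, so the "" default is never the value used).
def pvLookup (d : List (String × String)) (k : String) : String :=
  ((d.find? (fun p => p.1 == k)).map (fun p => p.2)).getD ""

-- ===== PORT A =====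
-- literal port of A's nested for-loops; state = (referee_idx, assigned_schedule).
-- referees[referee_idx % len(referees)] is exact under Pre_ (referees ≠ [], so the Nat index is in range).
def assign_referees_to_matches (schedule : List (List (String × String))) (referees : List (List (String × String))) : List (List (List (String × String))) :=
  (schedule.foldl
    (fun (st : Nat × List (List (List (String × String)))) round_matches =>
      let inner := round_matches.foldl
        (fun (st2 : Nat × List (List (String × String))) m =>
          let referee := referees.getD (st2.1 % referees.length) []
          (st2.1 + 1, st2.2 ++ [[("player_A_id", m.1), ("player_B_id", m.2),
            ("referee_id", pvLookup referee "referee_id"),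
            ("referee_endpoint", pvLookup referee "endpoint")]]))
        (st.1, [])
      (inner.1, st.2 ++ [inner.2]))
    (0, [])).2

-- ===== PORT B =====
-- literal port of Source B: flat comprehension over enumerate(chain.from_iterable(schedule)), then
-- re-slice; flat[pos:pos+len] is ported as (drop pos).take len, exact since both bounds are
-- nonnegative Nats; (k % n).toNat is exact since k ≥ 0 and n > 0 under Pre_.
def assign_referees_to_matches_alt (schedule : List (List (String × String))) (referees : List (List (String × String))) : List (List (List (String × String))) :=
  let n := referees.length
  let flat := (PySem.List.enumerate (schedule.flatMap (fun r => r))).map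
    (fun p => [("player_A_id", p.2.1), ("player_B_id", p.2.2),
      ("referee_id", pvLookup (referees.getD (p.1 % (n : Int)).toNat []) "referee_id"),
      ("referee_endpoint", pvLookup (referees.getD (p.1 % (n : Int)).toNat []) "endpoint")])
  (schedule.foldl
    (fun (st : Nat × List (List (List (String × String)))) round_matches =>
      (st.1 + round_matches.length, st.2 ++ [(flat.drop st.1).take round_matches.length]))
    (0, [])).2

-- ===== PRECONDITION & SPEC =====
-- Pre_ excludes exactly the inputs where Python A raises: empty referees (ValueError) and a
-- referee that is actually consulted (index < min(#matches, #referees)) missing one of the keys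
-- "referee_id"/"endpoint" (KeyError).
def Pre_assign_referees_to_matches (schedule : List (List (String × String))) (referees : List (List (String × String))) : Prop :=
  referees ≠ [] ∧
  ∀ i : Nat, i < min (schedule.flatMap (fun r => r)).length referees.length →
    ((referees.getD i []).find? (fun p => p.1 == "referee_id")).isSome = true ∧
    ((referees.getD i []).find? (fun p => p.1 == "endpoint")).isSome = true
instance (schedule : List (List (String × String))) (referees : List (List (String × String))) : Decidable (Pre_assign_referees_to_matches schedule referees) := by unfold Pre_assign_referees_to_matches; infer_instance
def pvWitness_assign_referees_to_matches : (List (List (String × String))) × (List (List (String × String))) :=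
  ([[("P01", "P02"), ("P03", "P04")], [("P02", "P03")]], [[("referee_id", "REF01"), ("endpoint", "E1")]])
def Spec_assign_referees_to_matches (schedule : List (List (String × String))) (referees : List (List (String × String))) (out : List (List (List (String × String)))) : Prop := out = assign_referees_to_matches_alt schedule referees
instance (schedule : List (List (String × String))) (referees : List (List (String × String))) (out : List (List (List (String × String)))) : Decidable (Spec_assign_referees_to_matches schedule referees out) := by unfold Spec_assign_referees_to_matches; infer_instance

-- ===== CLAIM (what is proved, stated in full; the proofs are below) =====
def Claim_equal_assign_referees_to_matches : Prop := ∀ (schedule : List (List (String × String))) (referees : List (List (String × String))), Dom_assign_referees_to_matches schedule referees → Pre_assign_referees_to_matches schedule referees → Spec_assign_referees_to_matches schedule referees (assign_referees_to_matches schedule referees)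

-- ===== LEMMAS AND PROOFS =====

-- the entry built for match m when the global match counter is k
def pvE (referees : List (List (String × String))) (k : Nat) (m : String × String) : List (String × String) :=
  let referee := referees.getD (k % referees.length) []
  [("player_A_id", m.1), ("player_B_id", m.2),
    ("referee_id", pvLookup referee "referee_id"),
    ("referee_endpoint", pvLookup referee "endpoint")]

-- entries of a block of matches, counter starting at k
def pvG (referees : List (List (String × String))) : Nat → List (String × String) → List (List (String × String))
  | _, [] => []
  | k, m :: ms => pvE referees k m :: pvG referees (k + 1) ms

-- the common intended result: one block per round, counter threaded across rounds
def pvR (referees : List (List (String × String))) : Nat → List (List (String × String)) → List (List (List (String × String)))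
  | _, [] => []
  | k, r :: rs => pvG referees k r :: pvR referees (k + r.length) rs

theorem pvG_length (referees : List (List (String × String))) (xs : List (String × String)) :
    ∀ k, (pvG referees k xs).length = xs.length := by
  induction xs with
  | nil => intro k; rfl
  | cons m ms ih => intro k; simp [pvG, ih]

theorem pvG_append (referees : List (List (String × String))) (xs ys : List (String × String)) :
    ∀ k, pvG referees k (xs ++ ys) = pvG referees k xs ++ pvG referees (k + xs.length) ys := by
  induction xs with
  | nil => intro k; simp [pvG]
  | cons m ms ih =>
      intro k
      simp only [List.cons_append, pvG, ih (k + 1), List.length_cons]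
      have h : k + 1 + ms.length = k + (ms.length + 1) := by omega
      rw [h]

theorem pvA_inner (referees : List (List (String × String))) (rnd : List (String × String)) :
    ∀ (k : Nat) (acc : List (List (String × String))),
      rnd.foldl
        (fun (st2 : Nat × List (List (String × String))) m =>
          let referee := referees.getD (st2.1 % referees.length) []
          (st2.1 + 1, st2.2 ++ [[("player_A_id", m.1), ("player_B_id", m.2),
            ("referee_id", pvLookup referee "referee_id"),
            ("referee_endpoint", pvLookup referee "endpoint")]]))
        (k, acc)
      = (k + rnd.length, acc ++ pvG referees k rnd) := by
  induction rnd with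
  | nil => intro k acc; simp [pvG]
  | cons m ms ih =>
      intro k acc
      simp only [List.foldl_cons]
      rw [ih]
      rw [Prod.mk.injEq]
      constructor
      · simp only [List.length_cons]; omega
      · simp [pvG, pvE]

theorem pvA_outer (referees : List (List (String × String))) (sch : List (List (String × String))) :
    ∀ (k : Nat) (acc : List (List (List (String × String)))),
      sch.foldl
        (fun (st : Nat × List (List (List (String × String)))) round_matches =>
          let inner := round_matches.foldl
            (fun (st2 : Nat × List (List (String × String))) m =>
              let referee := referees.getD (st2.1 % referees.length) []
              (st2.1 + 1, st2.2 ++ [[("player_A_id", m.1), ("player_B_id", m.2),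
                ("referee_id", pvLookup referee "referee_id"),
                ("referee_endpoint", pvLookup referee "endpoint")]]))
            (st.1, [])
          (inner.1, st.2 ++ [inner.2]))
        (k, acc)
      = (k + (sch.flatMap (fun r => r)).length, acc ++ pvR referees k sch) := by
  induction sch with
  | nil => intro k acc; simp [pvR]
  | cons r rs ih =>
      intro k acc
      simp only [List.foldl_cons]
      rw [pvA_inner referees r k, ih]
      rw [Prod.mk.injEq]
      constructor
      · simp; omega
      · simp [pvR]

theorem pvA_eq (schedule referees : List (List (String × String))) :
    assign_referees_to_matches schedule referees = pvR referees 0 schedule := by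
  unfold assign_referees_to_matches
  rw [pvA_outer]
  simp

theorem pvB_enum (referees : List (List (String × String))) (xs : List (String × String)) :
    ∀ k : Nat,
      (PySem.List.enumerate xs (k : Int)).map
        (fun p => [("player_A_id", p.2.1), ("player_B_id", p.2.2),
          ("referee_id", pvLookup (referees.getD (p.1 % (referees.length : Int)).toNat []) "referee_id"),
          ("referee_endpoint", pvLookup (referees.getD (p.1 % (referees.length : Int)).toNat []) "endpoint")])
      = pvG referees k xs := by
  induction xs with
  | nil => intro k; simp [PySem.List.enumerate_nil, pvG]
  | cons m ms ih =>
      intro k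
      rw [PySem.List.enumerate_cons]
      simp only [List.map_cons]
      have hk : ((k : Int) + 1) = ((k + 1 : Nat) : Int) := by push_cast; ring
      rw [hk, ih (k + 1)]
      have hmod : ((k : Int) % (referees.length : Int)).toNat = k % referees.length := by
        rw [← Int.natCast_mod, Int.toNat_natCast]
      simp [pvG, pvE, hmod]

theorem pvB_slice (referees : List (List (String × String))) (sch : List (List (String × String))) :
    ∀ (pos : Nat) (acc : List (List (List (String × String)))) (F : List (List (String × String))),
      F.drop pos = pvG referees pos (sch.flatMap (fun r => r)) →
      (sch.foldl
        (fun (st : Nat × List (List (List (String × String)))) round_matches =>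
          (st.1 + round_matches.length, st.2 ++ [(F.drop st.1).take round_matches.length]))
        (pos, acc)).2
      = acc ++ pvR referees pos sch := by
  induction sch with
  | nil => intro pos acc F _; simp [pvR]
  | cons r rs ih =>
      intro pos acc F hF
      simp only [List.flatMap_cons] at hF
      rw [pvG_append] at hF
      simp only [List.foldl_cons]
      have htake : (F.drop pos).take r.length = pvG referees pos r := by
        rw [hF, ← pvG_length referees r pos, List.take_left]
      have hdrop : F.drop (pos + r.length) = pvG referees (pos + r.length) (rs.flatMap (fun r => r)) := by
        have : F.drop (pos + r.length) = (F.drop pos).drop r.length := by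
          rw [List.drop_drop]
        rw [this, hF, ← pvG_length referees r pos, List.drop_left, pvG_length]
      rw [ih (pos + r.length) (acc ++ [(F.drop pos).take r.length]) F hdrop, htake]
      simp [pvR]

theorem pvB_eq (schedule referees : List (List (String × String))) :
    assign_referees_to_matches_alt schedule referees = pvR referees 0 schedule := by
  unfold assign_referees_to_matches_alt
  have h0 : ((PySem.List.enumerate (schedule.flatMap (fun r => r))).map
      (fun p => [("player_A_id", p.2.1), ("player_B_id", p.2.2),
        ("referee_id", pvLookup (referees.getD (p.1 % (referees.length : Int)).toNat []) "referee_id"),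
        ("referee_endpoint", pvLookup (referees.getD (p.1 % (referees.length : Int)).toNat []) "endpoint")]))
      = pvG referees 0 (schedule.flatMap (fun r => r)) := by
    have := pvB_enum referees (schedule.flatMap (fun r => r)) 0
    simpa using this
  simp only [h0]
  rw [pvB_slice referees schedule 0 [] _ (by simp)]
  simp

-- ===== VERDICT (by name: the statement is the Claim_ definition above) =====
theorem assign_referees_to_matches_spec : Claim_equal_assign_referees_to_matches := by
  intro schedule referees _ _
  unfold Spec_assign_referees_to_matches
  rw [pvA_eq, pvB_eq]
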